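-- pv_equiv track=rewrite | github.com/theRealCarneiro/Coding-UFSJ | Grafos/8_rainhas/grafo.py | verifica
-- ===== SOURCE A (Python) =====
-- def verifica(opcao, verticeA, verticeB):
--     if(opcao == "linha"):
--         if floor(verticeA / 8) == floor(verticeB / 8):
--             return True
--         return False
--
--     elif(opcao == "coluna"):
--         i = verticeA
--         while(i <= 63):
--             if i == verticeB:
--                 return True
--             i+=8
--         return False
--
--     elif(opcao == "diagonal"):
--         if floor(verticeA / 8) != 7 and verifica("coluna", verticeA, 63) == False:
--             i = verticeA + 9
--             while(i <= 63):
--                 if i == verticeB: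
--                     return True
--                 if verifica("coluna", i, 63) == True or verifica("linha", i, 63) == True:
--                     break
--                 i += 9
--
--         if floor(verticeA / 8) != 7 and verifica("coluna", verticeA, 56) == False:
--             i = verticeA + 7
--             while(i <= 63):
--                 if i == verticeB:
--                     return True
--                 if verifica("coluna", i, 56) == True or verifica("linha", i, 63) == True:
--                     break
--                 i += 7
--
--         return False
-- ===== SOURCE B (Python) =====
-- def verifica(opcao, verticeA, verticeB):
--     if opcao == "linha":
--         return verticeA // 8 == verticeB // 8
--     if opcao == "coluna":
--         # same column, with verticeB at or below verticeA on the 8x8 board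
--         return verticeA % 8 == verticeB % 8 and verticeA <= verticeB <= 63
--     if opcao == "diagonal":
--         ra, ca = divmod(verticeA, 8)
--         rb, cb = divmod(verticeB, 8)
--         return verticeA != verticeB and abs(ra - rb) == abs(ca - cb)
--     return None
-- ===== Notes on version B (the rewrite author's own statement) =====
-- stated objective: simpler
-- what changed: Replaced A's downward scanning loop for 'coluna' by a closed-form test (same column modulo 8, verticeB at or below verticeA on the board); Pre_ excludes opcao 'linha' and 'diagonal', on which A raises NameError because the module never imports floor, and B does the natural row/diagonal test there.
-- crash fix: A raises NameError on opcao 'linha' and 'diagonal' (floor is never imported in the module); B returns the natural same-row test resp. same-diagonal test there. — e.g. on verifica("linha", 0, 1): A raises NameError, B returns some true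
import Mathlib
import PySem

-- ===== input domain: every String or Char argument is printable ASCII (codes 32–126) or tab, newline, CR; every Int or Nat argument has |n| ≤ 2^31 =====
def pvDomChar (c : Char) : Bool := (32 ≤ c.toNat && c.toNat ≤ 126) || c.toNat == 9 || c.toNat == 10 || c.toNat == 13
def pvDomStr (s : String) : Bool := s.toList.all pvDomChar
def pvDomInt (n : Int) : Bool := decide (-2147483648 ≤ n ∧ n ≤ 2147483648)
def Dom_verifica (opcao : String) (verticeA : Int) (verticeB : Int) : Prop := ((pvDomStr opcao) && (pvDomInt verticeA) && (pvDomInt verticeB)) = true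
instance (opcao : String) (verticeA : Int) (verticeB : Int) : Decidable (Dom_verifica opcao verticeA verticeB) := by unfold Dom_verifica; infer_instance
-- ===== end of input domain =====

-- B replaces A's downward scanning loop for 'coluna' by a closed-form arithmetic test (objective: simpler).

-- ===== PORT A =====
-- floor(x / 8): Python computes it through a float, exact for |x| ≤ 2^31, so on Dom it is
-- integer floor division (PySem.Int.floordiv). In this module `floor` is never imported, so
-- the branches that call it raise NameError; they lie outside Pre_ below.
def pyLinha (a b : Int) : Bool := PySem.Int.floordiv a 8 == PySem.Int.floordiv b 8

-- the 'coluna' while loop (i = verticeA; while i <= 63: if i == verticeB: return True; i += 8)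
def pyColunaLoop (i b : Int) : Bool :=
  if i ≤ 63 then
    if i == b then true
    else pyColunaLoop (i + 8) b
  else false
termination_by (64 - i).toNat
decreasing_by omega

-- first diagonal while loop (step +9; A's recursive calls verifica("coluna", i, 63) /
-- verifica("linha", i, 63) are exactly pyColunaLoop i 63 / pyLinha i 63)
def pyDiag1Loop (i b : Int) : Bool :=
  if i ≤ 63 then
    if i == b then true
    else if pyColunaLoop i 63 || pyLinha i 63 then false
    else pyDiag1Loop (i + 9) b
  else false
termination_by (64 - i).toNat
decreasing_by omega

-- second diagonal while loop (step +7, break on verifica("coluna", i, 56) or verifica("linha", i, 63))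
def pyDiag2Loop (i b : Int) : Bool :=
  if i ≤ 63 then
    if i == b then true
    else if pyColunaLoop i 56 || pyLinha i 63 then false
    else pyDiag2Loop (i + 7) b
  else false
termination_by (64 - i).toNat
decreasing_by omega

def verifica (opcao : String) (verticeA : Int) (verticeB : Int) : Option Bool :=
  if opcao = "linha" then some (pyLinha verticeA verticeB)
  else if opcao = "coluna" then some (pyColunaLoop verticeA verticeB)
  else if opcao = "diagonal" then
    -- each gated loop returns True when it finds verticeB, otherwise control falls through to False
    some ((((PySem.Int.floordiv verticeA 8 != 7) && (pyColunaLoop verticeA 63 == false)) && pyDiag1Loop (verticeA + 9) verticeB)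
       || (((PySem.Int.floordiv verticeA 8 != 7) && (pyColunaLoop verticeA 56 == false)) && pyDiag2Loop (verticeA + 7) verticeB))
  else none

-- ===== PORT B =====
def verifica_alt (opcao : String) (verticeA : Int) (verticeB : Int) : Option Bool :=
  if opcao = "linha" then some (PySem.Int.floordiv verticeA 8 == PySem.Int.floordiv verticeB 8)
  else if opcao = "coluna" then
    -- same column, with verticeB at or below verticeA on the 8x8 board
    some ((PySem.Int.mod verticeA 8 == PySem.Int.mod verticeB 8)
          && decide (verticeA ≤ verticeB) && decide (verticeB ≤ 63))
  else if opcao = "diagonal" then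
    let ra := PySem.Int.floordiv verticeA 8
    let ca := PySem.Int.mod verticeA 8
    let rb := PySem.Int.floordiv verticeB 8
    let cb := PySem.Int.mod verticeB 8
    some (decide (verticeA ≠ verticeB) && ((ra - rb).natAbs == (ca - cb).natAbs))
  else none

-- ===== PRECONDITION & SPEC =====
-- The module snippet never imports `floor`, so Python A raises NameError as soon as the
-- "linha" or "diagonal" branch runs; Pre_ excludes exactly those two opcao values
-- (A returns normally on every other input).
def Pre_verifica (opcao : String) (verticeA : Int) (verticeB : Int) : Prop := opcao ≠ "linha" ∧ opcao ≠ "diagonal"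
instance (opcao : String) (verticeA : Int) (verticeB : Int) : Decidable (Pre_verifica opcao verticeA verticeB) := by unfold Pre_verifica; infer_instance
def pvWitness_verifica : String × Int × Int := ("coluna", 0, 8)

-- A raises NameError (unimported `floor`) whenever opcao is "linha" or "diagonal"; B returns
-- the natural same-row test resp. same-diagonal test there.
def Raises_verifica (opcao : String) (verticeA : Int) (verticeB : Int) : Prop := opcao = "linha" ∨ opcao = "diagonal"
instance (opcao : String) (verticeA : Int) (verticeB : Int) : Decidable (Raises_verifica opcao verticeA verticeB) := by unfold Raises_verifica; infer_instance
def pvRaiseWitness_verifica : String × Int × Int := ("linha", 0, 1)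
def pvRaiseWitnessOut_verifica : Option Bool := some true

def Spec_verifica (opcao : String) (verticeA : Int) (verticeB : Int) (out : Option Bool) : Prop := out = verifica_alt opcao verticeA verticeB
instance (opcao : String) (verticeA : Int) (verticeB : Int) (out : Option Bool) : Decidable (Spec_verifica opcao verticeA verticeB out) := by unfold Spec_verifica; infer_instance

-- ===== CLAIM (what is proved, stated in full; the proofs are below) =====
def Claim_equal_verifica : Prop := ∀ (opcao : String) (verticeA : Int) (verticeB : Int), Dom_verifica opcao verticeA verticeB → Pre_verifica opcao verticeA verticeB → Spec_verifica opcao verticeA verticeB (verifica opcao verticeA verticeB)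
def Claim_raises_verifica : Prop := (∀ (opcao : String) (verticeA : Int) (verticeB : Int), Dom_verifica opcao verticeA verticeB → Raises_verifica opcao verticeA verticeB → ¬ Pre_verifica opcao verticeA verticeB) ∧ (Dom_verifica (pvRaiseWitness_verifica.1) (pvRaiseWitness_verifica.2.1) (pvRaiseWitness_verifica.2.2) ∧ Raises_verifica (pvRaiseWitness_verifica.1) (pvRaiseWitness_verifica.2.1) (pvRaiseWitness_verifica.2.2) ∧ verifica_alt (pvRaiseWitness_verifica.1) (pvRaiseWitness_verifica.2.1) (pvRaiseWitness_verifica.2.2) = pvRaiseWitnessOut_verifica)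

-- ===== LEMMAS AND PROOFS =====

lemma L_coluna (i b : Int) : pyColunaLoop i b = true ↔ (i ≤ b ∧ b ≤ 63 ∧ (b - i) % 8 = 0) := by
  fun_induction pyColunaLoop i b with
  | case1 i hle heq => simp at heq; exact ⟨fun _ => by omega, fun _ => rfl⟩
  | case2 i hle heq ih => rw [ih]; simp at heq; omega
  | case3 i h => simp only [Bool.false_eq_true, false_iff]; omega

-- ===== VERDICT (by name: the statement is the Claim_ definition above) =====
theorem verifica_spec : Claim_equal_verifica := by
  intro opcao a b _hDom hPre
  unfold Spec_verifica
  obtain ⟨h1, h3⟩ := hPre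
  by_cases h2 : opcao = "coluna"
  · simp only [h2, verifica, verifica_alt, if_neg (by decide : ¬("coluna" = "linha")), reduceIte]
    apply congrArg
    rw [Bool.eq_iff_iff, L_coluna]
    simp only [PySem.Int.mod_eq_emod_of_pos (show (0:Int) < 8 by omega), Bool.and_eq_true, beq_iff_eq, decide_eq_true_eq]
    omega
  · simp [verifica, verifica_alt, h1, h2, h3]

@[simp]
theorem verifica_raises : Claim_raises_verifica := by
  unfold Claim_raises_verifica
  exact ⟨fun opcao a b _ hr hp => by unfold Raises_verifica at hr; unfold Pre_verifica at hp; tauto, by decide⟩
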